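-- pv_equiv track=rewrite | github.com/AlexTzib/Torn_Dark_tools | tools/create_src.py | count_braces
-- ===== SOURCE A (Python) =====
-- def count_braces(line):
--     """Count net { minus } in a line, ignoring strings."""
--     depth = 0
--     in_str = None
--     escaped = False
--     for ch in line:
--         if escaped:
--             escaped = False
--             continue
--         if ch == '\\':
--             escaped = True
--             continue
--         if in_str:
--             if ch == in_str:
--                 in_str = None
--             continue
--         if ch in ('"', "'", '`'):
--             in_str = ch
--             continue
--         if ch == '{':
--             depth += 1
--         elif ch == '}':
--             depth -= 1
--     return depth
-- ===== SOURCE B (Python) =====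
-- def count_braces(line):
--     """Count net { minus } in a line, ignoring strings.
--
--     Tokenize-then-count: one scan strips escape pairs and whole string
--     literals into a cleaned list, then braces are counted in the residue.
--     """
--     n = len(line)
--     cleaned = []
--     i = 0
--     while i < n:
--         ch = line[i]
--         if ch == '\\':
--             i += 2                      # escape pair consumed whole
--         elif ch in '"\'`':
--             i += 1
--             while i < n:                # skip the string literal
--                 c = line[i]
--                 if c == '\\':
--                     i += 2
--                 elif c == ch:
--                     i += 1
--                     break
--                 else:
--                     i += 1
--         else:
--             cleaned.append(ch)
--             i += 1
--     return cleaned.count('{') - cleaned.count('}')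
-- ===== Notes on version B (the rewrite author's own statement) =====
-- stated objective: alternative
-- what changed: Replaces the per-character boolean/option state machine with a tokenize-then-count pipeline: a scanner consumes escape pairs and whole string literals in dedicated inner skips, collects the remaining code characters, and counts braces in that residue.
import Mathlib
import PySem

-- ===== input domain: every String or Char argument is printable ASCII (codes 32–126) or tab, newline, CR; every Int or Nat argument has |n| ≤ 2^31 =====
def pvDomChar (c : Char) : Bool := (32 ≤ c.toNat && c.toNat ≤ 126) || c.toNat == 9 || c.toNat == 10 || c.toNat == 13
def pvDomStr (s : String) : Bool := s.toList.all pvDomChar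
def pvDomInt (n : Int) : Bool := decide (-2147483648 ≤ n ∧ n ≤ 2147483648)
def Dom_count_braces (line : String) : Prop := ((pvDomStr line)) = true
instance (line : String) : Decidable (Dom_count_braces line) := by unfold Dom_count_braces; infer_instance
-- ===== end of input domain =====

-- B replaces A's per-character boolean/option state machine by a tokenize-then-count
-- pipeline (strip escape pairs and whole string literals, then count braces); same cost.


-- termination helper for the B-side scanners
theorem cbTailLe {α} (l : List α) : l.tail.length ≤ l.length := by
  cases l <;> simp

-- ===== PORT A =====
-- state: (depth, in_str, escaped), branches in A's order
def cbStepA : (Int × Option Char × Bool) → Char → (Int × Option Char × Bool)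
  | (d, s, true), _ => (d, s, false)
  | (d, s, false), ch =>
    if ch = '\\' then (d, s, true)
    else
      match s with
      | some q => (d, if ch = q then none else some q, false)
      | none =>
        if ch = '"' ∨ ch = '\'' ∨ ch = '`' then (d, some ch, false)
        else if ch = '{' then (d + 1, none, false)
        else if ch = '}' then (d - 1, none, false)
        else (d, none, false)

def count_braces (line : String) : Int :=
  (line.toList.foldl cbStepA (0, none, false)).1

-- ===== PORT B =====
-- skip the body of a string literal opened with quote q (inner while loop of B)
def cbSkipStr (q : Char) : List Char → List Char
  | [] => []
  | c :: rest =>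
    if c = '\\' then cbSkipStr q rest.tail
    else if c = q then rest
    else cbSkipStr q rest
termination_by l => l.length
decreasing_by
  · exact Nat.lt_succ_of_le (cbTailLe rest)
  · exact Nat.lt_succ_self _

theorem cbSkipStr_length_le (q : Char) (l : List Char) : (cbSkipStr q l).length ≤ l.length := by
  induction hn : l.length using Nat.strong_induction_on generalizing l with
  | _ n ih =>
    subst hn
    match l with
    | [] => simp [cbSkipStr]
    | c :: rest =>
      rw [cbSkipStr]
      split_ifs with h1 h2
      · exact le_trans (ih rest.tail.length
          (Nat.lt_succ_of_le (cbTailLe rest)) rest.tail rfl)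
          (Nat.le_succ_of_le (cbTailLe rest))
      · exact Nat.le_succ _
      · exact le_trans (ih rest.length (Nat.lt_succ_self _) rest rfl) (Nat.le_succ _)

-- outer scan: strip escape pairs and string literals, keep the rest
def cbClean : List Char → List Char
  | [] => []
  | ch :: rest =>
    if ch = '\\' then cbClean rest.tail
    else if ch = '"' ∨ ch = '\'' ∨ ch = '`' then cbClean (cbSkipStr ch rest)
    else ch :: cbClean rest
termination_by l => l.length
decreasing_by
  · exact Nat.lt_succ_of_le (cbTailLe rest)
  · exact Nat.lt_succ_of_le (cbSkipStr_length_le _ _)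
  · exact Nat.lt_succ_self _

def count_braces_alt (line : String) : Int :=
  let cleaned := cbClean line.toList
  (cleaned.count '{' : Int) - (cleaned.count '}' : Int)

-- ===== PRECONDITION & SPEC =====
def Spec_count_braces (line : String) (out : Int) : Prop := out = count_braces_alt line
instance (line : String) (out : Int) : Decidable (Spec_count_braces line out) := by unfold Spec_count_braces; infer_instance

-- ===== CLAIM (what is proved, stated in full; the proofs are below) =====
def Claim_equal_count_braces : Prop := ∀ (line : String), Dom_count_braces line → Spec_count_braces line (count_braces line)

-- ===== LEMMAS AND PROOFS =====

def cbC (l : List Char) : Int := (l.count '{' : Int) - (l.count '}' : Int)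

theorem cbMain : ∀ n (l : List Char), l.length ≤ n →
    (∀ d : Int, (l.foldl cbStepA (d, none, false)).1 = d + cbC (cbClean l)) ∧
    (∀ (d : Int) (q : Char),
      (l.foldl cbStepA (d, some q, false)).1 = d + cbC (cbClean (cbSkipStr q l))) := by
  intro n
  induction n with
  | zero =>
      intro l hl
      have : l = [] := List.eq_nil_of_length_eq_zero (Nat.le_zero.mp hl)
      subst this
      simp [cbClean, cbSkipStr, cbC]
  | succ n ih =>
      intro l hl
      match l with
      | [] => simp [cbClean, cbSkipStr, cbC]
      | ch :: rest =>
        have hr : rest.length ≤ n := Nat.le_of_succ_le_succ hl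
        have hrt : rest.tail.length ≤ n := le_trans (cbTailLe rest) hr
        constructor
        · intro d
          by_cases hbs : ch = '\\'
          · subst hbs
            match rest with
            | [] => simp [cbStepA, cbClean, cbC]
            | c2 :: rest2 =>
              have h2 : rest2.length ≤ n := le_trans (Nat.le_succ _) hr
              simp only [List.foldl, cbClean, List.tail]
              rw [show cbStepA (d, none, false) '\\' = (d, none, true) by simp [cbStepA]]
              rw [show cbStepA (d, none, true) c2 = (d, none, false) by simp [cbStepA]]
              simpa using (ih rest2 h2).1 d
          · by_cases hq : ch = '"' ∨ ch = '\'' ∨ ch = '`'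
            · simp only [List.foldl, cbClean, if_neg hbs, if_pos hq]
              rw [show cbStepA (d, none, false) ch = (d, some ch, false) by
                simp [cbStepA, hbs, hq]]
              exact (ih rest hr).2 d ch
            · have hcl : cbClean (ch :: rest) = ch :: cbClean rest := by
                rw [cbClean, if_neg hbs, if_neg hq]
              by_cases ho : ch = '{'
              · subst ho
                simp only [List.foldl, hcl]
                rw [show cbStepA (d, none, false) '{' = (d + 1, none, false) by
                  simp [cbStepA]]
                rw [(ih rest hr).1 (d + 1)]
                simp [cbC]
                ring
              · by_cases hc : ch = '}'
                · subst hc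
                  simp only [List.foldl, hcl]
                  rw [show cbStepA (d, none, false) '}' = (d - 1, none, false) by
                    simp [cbStepA]]
                  rw [(ih rest hr).1 (d - 1)]
                  simp [cbC]
                  ring
                · simp only [List.foldl, hcl]
                  rw [show cbStepA (d, none, false) ch = (d, none, false) by
                    simp [cbStepA, hbs, hq, ho, hc]]
                  rw [(ih rest hr).1 d]
                  simp [cbC, ho, hc]
        · intro d q
          by_cases hbs : ch = '\\'
          · subst hbs
            match rest with
            | [] => simp [cbStepA, cbSkipStr, cbClean, cbC]
            | c2 :: rest2 =>
              have h2 : rest2.length ≤ n := le_trans (Nat.le_succ _) hr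
              simp only [List.foldl]
              rw [show cbStepA (d, some q, false) '\\' = (d, some q, true) by simp [cbStepA]]
              rw [show cbStepA (d, some q, true) c2 = (d, some q, false) by simp [cbStepA]]
              rw [(ih rest2 h2).2 d q]
              rw [show cbSkipStr q ('\\' :: c2 :: rest2) = cbSkipStr q rest2 by
                rw [cbSkipStr]; simp [List.tail]]
          · by_cases hcq : ch = q
            · subst hcq
              simp only [List.foldl]
              rw [show cbStepA (d, some ch, false) ch = (d, none, false) by
                simp [cbStepA, hbs]]
              rw [(ih rest hr).1 d]
              rw [show cbSkipStr ch (ch :: rest) = rest by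
                rw [cbSkipStr]; simp [hbs]]
            · simp only [List.foldl]
              rw [show cbStepA (d, some q, false) ch = (d, some q, false) by
                simp [cbStepA, hbs, hcq]]
              rw [(ih rest hr).2 d q]
              rw [show cbSkipStr q (ch :: rest) = cbSkipStr q rest by
                rw [cbSkipStr]; simp [hbs, hcq]]

-- ===== VERDICT (by name: the statement is the Claim_ definition above) =====
theorem count_braces_spec : Claim_equal_count_braces := by
  intro line _
  unfold Spec_count_braces count_braces count_braces_alt
  have h := (cbMain line.toList.length line.toList le_rfl).1 0
  simpa [cbC] using h
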